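-- pv_equiv track=rewrite | github.com/maxnelso/algorithms_competitions | top_coder/SRM 683/EqualSubstrings2.py | get
-- ===== SOURCE A (Python) =====
-- def get(s):
--   count = 0
--   for i in range(len(s)):
--     for j in range(i, len(s)):
--       length = j - i + 1
--       sub1 = s[i:j + 1]
--       for k in range(j + 1, len(s) - length + 1):
--         sub2 = s[k:k + length]
--         if sub2 == sub1:
--           count += 1
--   return count
-- ===== SOURCE B (Python) =====
-- def get(s):
--     n = len(s)
--     total = 0
--     for i in range(n):
--         for k in range(i + 1, n):
--             m = 0
--             while k + m < n and s[i + m] == s[k + m]: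
--                 m += 1
--             total += min(m, k - i)
--     return total
-- ===== Notes on version B (the rewrite author's own statement) =====
-- stated objective: faster
-- what changed: Instead of enumerating every substring s[i:j+1] and rescanning for equal later copies, B iterates over start pairs (i,k), computes the longest common prefix of the two suffixes by one character scan, and adds min(lcp, k-i) non-overlapping equal-substring pairs in closed form.
import Mathlib
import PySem

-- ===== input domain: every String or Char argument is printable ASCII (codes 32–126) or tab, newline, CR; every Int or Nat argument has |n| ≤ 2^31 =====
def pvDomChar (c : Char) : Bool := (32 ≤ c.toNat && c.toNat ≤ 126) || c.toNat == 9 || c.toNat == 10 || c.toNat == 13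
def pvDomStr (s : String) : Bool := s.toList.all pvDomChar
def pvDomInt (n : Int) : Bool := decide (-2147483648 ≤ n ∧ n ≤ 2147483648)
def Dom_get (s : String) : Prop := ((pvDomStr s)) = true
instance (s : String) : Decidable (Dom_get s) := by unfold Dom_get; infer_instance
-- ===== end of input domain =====

-- B replaces A's enumerate-every-substring-then-rescan counting by a per-pair
-- longest-common-prefix scan summed in closed form as min(lcp, k-i); same return value.

-- ===== PORT A =====
def get (s : String) : Int :=
  (PySem.List.pyRange 0 (PySem.Str.len s) 1).foldl (fun count i =>
    (PySem.List.pyRange i (PySem.Str.len s) 1).foldl (fun count j =>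
      let length := j - i + 1
      let sub1 := PySem.Str.slice s (some i) (some (j + 1))
      (PySem.List.pyRange (j + 1) (PySem.Str.len s - length + 1) 1).foldl (fun count k =>
        let sub2 := PySem.Str.slice s (some k) (some (k + length))
        if sub2 == sub1 then count + 1 else count) count) count) 0

-- ===== PORT B =====
-- the 'while k + m < n and s[i + m] == s[k + m]: m += 1' loop of Source B; the guard keeps both
-- indices in range (the loop is only entered with i < k), so comparing the two pyGet? options
-- is exactly Python's character comparison there
def lcpLoop (s : String) (n i k m : Int) : Int :=
  if _h : k + m < n then
    if PySem.Str.pyGet? s (i + m) == PySem.Str.pyGet? s (k + m) then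
      lcpLoop s n i k (m + 1)
    else m
  else m
termination_by (n - (k + m)).toNat
decreasing_by omega

def get_alt (s : String) : Int :=
  let n := PySem.Str.len s
  (PySem.List.pyRange 0 n 1).foldl (fun total i =>
    (PySem.List.pyRange (i + 1) n 1).foldl (fun total k =>
      total + min (lcpLoop s n i k 0) (k - i)) total) 0

-- ===== PRECONDITION & SPEC =====
def Spec_get (s : String) (out : Int) : Prop := out = get_alt s
instance (s : String) (out : Int) : Decidable (Spec_get s out) := by unfold Spec_get; infer_instance

-- ===== CLAIM (what is proved, stated in full; the proofs are below) =====
def Claim_equal_get : Prop := ∀ (s : String), Dom_get s → Spec_get s (get s)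

-- ===== LEMMAS AND PROOFS =====

-- length of the longest common prefix of two lists
def pvLcp : List Char → List Char → Nat
  | a :: as, b :: bs => if a = b then pvLcp as bs + 1 else 0
  | _, _ => 0

theorem pvLcp_nil_right (xs : List Char) : pvLcp xs [] = 0 := by
  cases xs <;> rfl

theorem pvLcp_le_right (xs ys : List Char) : pvLcp xs ys ≤ ys.length := by
  induction xs generalizing ys with
  | nil => cases ys <;> simp [pvLcp]
  | cons a as ih =>
    cases ys with
    | nil => simp [pvLcp]
    | cons b bs =>
      simp only [pvLcp, List.length_cons]
      split
      · exact Nat.succ_le_succ (ih bs)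
      · omega

theorem pvLcp_comm (xs ys : List Char) : pvLcp xs ys = pvLcp ys xs := by
  induction xs generalizing ys with
  | nil => cases ys <;> rfl
  | cons a as ih =>
    cases ys with
    | nil => rfl
    | cons b bs =>
      simp only [pvLcp]
      rcases eq_or_ne a b with h | h
      · simp [h, ih bs]
      · simp [h, Ne.symm h]

-- prefixes of length L agree iff L ≤ lcp (a length bound on one side suffices)
theorem pvTake_eq_iff (L : Nat) (xs ys : List Char) (h : L ≤ ys.length) :
    xs.take L = ys.take L ↔ L ≤ pvLcp xs ys := by
  induction L generalizing xs ys with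
  | zero => simp
  | succ L ih =>
    cases ys with
    | nil => simp at h
    | cons b bs =>
      cases xs with
      | nil =>
        simp only [List.take_nil, List.take_succ_cons, pvLcp]
        constructor
        · intro hh; exact absurd hh (by simp)
        · intro hh; omega
      | cons a as =>
        simp only [List.take_succ_cons, pvLcp, List.cons_eq_cons]
        rcases eq_or_ne a b with hab | hab
        · subst hab
          simp only [if_true, true_and]
          rw [ih as bs (by simpa using h)]
          omega
        · simp [hab]

-- the while loop computes the longest common prefix of the two suffixes
theorem lcpLoop_eq (s : String) (i k : Nat) (hik : i < k) : ∀ (fuel m : Nat),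
    fuel = s.toList.length - (k + m) →
    lcpLoop s (s.toList.length) i k m
      = (m : Int) + pvLcp (s.toList.drop (i + m)) (s.toList.drop (k + m)) := by
  intro fuel
  induction fuel with
  | zero =>
    intro m hm
    rw [lcpLoop]
    rw [dif_neg (by omega)]
    rw [show s.toList.drop (k + m) = [] from List.drop_eq_nil_of_le (by omega)]
    rw [pvLcp_nil_right]
    simp
  | succ fuel ih =>
    intro m hm
    have hkm : k + m < s.toList.length := by omega
    have him : i + m < s.toList.length := by omega
    rw [lcpLoop]
    rw [dif_pos (by omega)]
    have g1 : PySem.Str.pyGet? s ((i : Int) + m) = some (s.toList[i + m]) := by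
      have : ((i : Int) + m) = ((i + m : Nat) : Int) := by push_cast; ring
      rw [this, PySem.Str.pyGet?_natCast, List.getElem?_eq_getElem him]
    have g2 : PySem.Str.pyGet? s ((k : Int) + m) = some (s.toList[k + m]) := by
      have : ((k : Int) + m) = ((k + m : Nat) : Int) := by push_cast; ring
      rw [this, PySem.Str.pyGet?_natCast, List.getElem?_eq_getElem hkm]
    rw [g1, g2]
    have hd1 : s.toList.drop (i + m) = s.toList[i + m] :: s.toList.drop (i + m + 1) :=
      (List.getElem_cons_drop him).symm
    have hd2 : s.toList.drop (k + m) = s.toList[k + m] :: s.toList.drop (k + m + 1) :=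
      (List.getElem_cons_drop hkm).symm
    rcases eq_or_ne (s.toList[i + m]) (s.toList[k + m]) with he | he
    · rw [if_pos (by simp [he])]
      have hih := ih (m + 1) (by omega)
      rw [show i + (m + 1) = i + m + 1 from by omega,
          show k + (m + 1) = k + m + 1 from by omega] at hih
      rw [show ((m : Int) + 1) = ((m + 1 : Nat) : Int) from by push_cast; ring, hih]
      rw [hd1, hd2]
      simp only [pvLcp, if_pos he]
      push_cast
      ring
    · rw [if_neg (by simp [he])]
      rw [hd1, hd2]
      simp only [pvLcp, if_neg he]
      simp

-- bridges from pyRange loops to Finset.Ico sums/counts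
theorem pvRangeSum (N : Nat) (h : Nat → Int) :
    ((List.range N).map h).sum = ∑ t ∈ Finset.range N, h t := by
  rw [Finset.sum]
  simp [Finset.range, Multiset.range]

theorem pvBridge_sum (a b : Nat) (g : Int → Int) :
    ((PySem.List.pyRange a b 1).map g).sum = ∑ k ∈ Finset.Ico a b, g k := by
  rw [PySem.List.pyRange_one, List.map_map, pvRangeSum]
  rw [Finset.sum_Ico_eq_sum_range]
  have : ((b : Int) - a).toNat = b - a := by omega
  rw [this]
  refine Finset.sum_congr rfl fun t _ => ?_
  simp only [Function.comp_apply]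
  congr 1

theorem pvBridge_count (a b : Nat) (p : Int → Bool) :
    (PySem.List.pyRange (a : Int) b 1).countP p
      = ((Finset.Ico a b).filter (fun k : Nat => p (k : Int))).card := by
  rw [PySem.List.pyRange_one, List.countP_map]
  have h1 : (List.range ((b : Int) - a).toNat).countP ((fun x => p x) ∘ fun k : Nat => (a : Int) + k)
      = ((Finset.range ((b : Int) - a).toNat).filter (fun t : Nat => p ((a : Int) + t))).card := by
    simp [List.countP_eq_length_filter, Finset.filter, Finset.range, Multiset.range,
      Function.comp_def]
  rw [h1]
  have : ((b : Int) - a).toNat = b - a := by omega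
  rw [this]
  rw [Finset.card_filter, Finset.card_filter, Finset.sum_Ico_eq_sum_range]
  refine Finset.sum_congr rfl fun t _ => ?_
  congr 2

-- A's slice-equality test is exactly the lcp bound
theorem pvSlice_iff (s : String) (i j k : Nat) (hij : i ≤ j) (hj : j < s.toList.length) :
    ((PySem.Str.slice s (some (k : Int)) (some ((k : Int) + ((j : Int) - i + 1)))
        == PySem.Str.slice s (some (i : Int)) (some ((j : Int) + 1))) = true)
      ↔ j - i + 1 ≤ pvLcp (s.toList.drop i) (s.toList.drop k) := by
  rw [beq_iff_eq]
  rw [show (∀ x y : String, (x = y) = (x.toList = y.toList)) from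
    fun x y => propext ⟨fun h => by rw [h], fun h => String.toList_inj.mp h⟩]
  simp only [PySem.Str.slice, String.toList_ofList,
    show @PySem.Chars.slice = @PySem.List.slice Char from rfl]
  rw [show ((k : Int) + ((j : Int) - i + 1)) = (k : Int) + ((j - i + 1 : Nat) : Int) from by omega]
  rw [show ((j : Int) + 1) = (i : Int) + ((j - i + 1 : Nat) : Int) from by omega]
  rw [PySem.List.slice_natCast_add, PySem.List.slice_natCast_add]
  rw [pvTake_eq_iff (j - i + 1) _ (s.toList.drop i) (by rw [List.length_drop]; omega)]
  rw [pvLcp_comm]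

-- the combinatorial core: per left endpoint i, A's length/position double count equals
-- B's per-pair min(lcp, k-i) sum
theorem pvCore (n i : Nat) (f : Nat → Nat) (hf : ∀ k, f k ≤ n - k) :
    ∑ j ∈ Finset.Ico i n,
        ((Finset.Ico (j + 1) (n - (j - i))).filter (fun k => j - i + 1 ≤ f k)).card
      = ∑ k ∈ Finset.Ico (i + 1) n, min (f k) (k - i) := by
  have step1 : ∀ j ∈ Finset.Ico i n,
      ((Finset.Ico (j + 1) (n - (j - i))).filter (fun k => j - i + 1 ≤ f k)).card
        = ∑ k ∈ Finset.Ico (i + 1) n,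
            (if j + 1 ≤ k ∧ k < n - (j - i) ∧ j - i + 1 ≤ f k then 1 else 0) := by
    intro j hj
    rw [Finset.mem_Ico] at hj
    rw [← Finset.card_filter]
    congr 1
    ext k
    simp only [Finset.mem_filter, Finset.mem_Ico]
    omega
  rw [Finset.sum_congr rfl step1, Finset.sum_comm]
  refine Finset.sum_congr rfl fun k hk => ?_
  rw [Finset.mem_Ico] at hk
  rw [← Finset.card_filter]
  have hset : (Finset.Ico i n).filter (fun j => j + 1 ≤ k ∧ k < n - (j - i) ∧ j - i + 1 ≤ f k)
      = Finset.Ico i (i + min (f k) (k - i)) := by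
    have hc := hf k
    ext j
    simp only [Finset.mem_filter, Finset.mem_Ico]
    rcases Nat.le_total (f k) (k - i) with h | h
    · rw [Nat.min_eq_left h]; omega
    · rw [Nat.min_eq_right h]; omega
  rw [hset, Nat.card_Ico]
  omega

-- the common closed form both ports reach
theorem getA_eq (s : String) :
    get s = ∑ i ∈ Finset.Ico 0 s.toList.length, ∑ k ∈ Finset.Ico (i + 1) s.toList.length,
        (min (pvLcp (s.toList.drop i) (s.toList.drop k)) (k - i) : Int) := by
  have hlen : PySem.Str.len s = (s.toList.length : Int) := by simp [PySem.Str.len_eq]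
  unfold _root_.get
  simp only [hlen, PySem.List.foldl_if_add_one, PySem.List.foldl_add]
  rw [show (0 : Int) = ((0 : Nat) : Int) from rfl, pvBridge_sum 0 s.toList.length]
  simp only [Nat.cast_zero, zero_add]
  refine Finset.sum_congr rfl fun i hi => ?_
  rw [Finset.mem_Ico] at hi
  rw [pvBridge_sum i s.toList.length]
  have key := pvCore s.toList.length i (fun k => pvLcp (s.toList.drop i) (s.toList.drop k))
    (fun k => le_trans (pvLcp_le_right _ _) (by rw [List.length_drop]))
  beta_reduce at key
  trans (∑ j ∈ Finset.Ico i s.toList.length,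
      (((Finset.Ico (j + 1) (s.toList.length - (j - i))).filter
          (fun k => j - i + 1 ≤ pvLcp (s.toList.drop i) (s.toList.drop k))).card : Int))
  · refine Finset.sum_congr rfl fun j hj => ?_
    rw [Finset.mem_Ico] at hj
    rw [show ((j : Int) + 1) = ((j + 1 : Nat) : Int) from by push_cast; ring]
    rw [show ((s.toList.length : Int) - ((j : Int) - i + 1) + 1)
        = ((s.toList.length - (j - i) : Nat) : Int) from by omega]
    rw [pvBridge_count (j + 1) (s.toList.length - (j - i))]
    congr 2
    refine Finset.filter_congr fun k hk => ?_
    exact pvSlice_iff s i j k hj.1 hj.2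
  · rw [← Nat.cast_sum, key, Nat.cast_sum]
    refine Finset.sum_congr rfl fun k hk => ?_
    rw [Finset.mem_Ico] at hk
    rw [Nat.cast_min, Nat.cast_sub (by omega)]

theorem getB_eq (s : String) :
    get_alt s = ∑ i ∈ Finset.Ico 0 s.toList.length, ∑ k ∈ Finset.Ico (i + 1) s.toList.length,
        (min (pvLcp (s.toList.drop i) (s.toList.drop k)) (k - i) : Int) := by
  have hlen : PySem.Str.len s = (s.toList.length : Int) := by simp [PySem.Str.len_eq]
  simp only [get_alt, hlen, PySem.List.foldl_add]
  rw [show (0 : Int) = ((0 : Nat) : Int) from rfl, pvBridge_sum 0 s.toList.length]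
  simp only [Nat.cast_zero, zero_add]
  refine Finset.sum_congr rfl fun i hi => ?_
  rw [Finset.mem_Ico] at hi
  rw [show ((i : Int) + 1) = ((i + 1 : Nat) : Int) from by push_cast; ring,
     pvBridge_sum (i + 1) s.toList.length]
  refine Finset.sum_congr rfl fun k hk => ?_
  rw [Finset.mem_Ico] at hk
  have hik : i < k := by omega
  have := lcpLoop_eq s i k hik (s.toList.length - (k + 0)) 0 rfl
  simp only [Nat.add_zero] at this
  rw [show ((0 : Nat) : Int) = (0 : Int) from rfl] at this
  rw [this, zero_add]

-- ===== VERDICT (by name: the statement is the Claim_ definition above) =====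
theorem get_spec : Claim_equal_get := by
  intro s _
  unfold Spec_get
  rw [getA_eq, getB_eq]
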